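-- pv_equiv track=rewrite | github.com/dduan/TBN | calcneue/reduce_unit.py | unit_divide
-- ===== SOURCE A (Python) =====
-- def simplify_unit(unit):
--     count = {}
--     result = (set(), set())
--     for u, deg in unit[0]:
--         count[u] = count.get(u, 0) + deg
--     for u, deg in unit[1]:
--         count[u] = count.get(u, 0) - deg
--     for u, deg in count.items():
--         if deg > 0: result[0].add((u, deg))
--         if deg < 0: result[1].add((u, -deg))
--     return result
--
-- def unit_divide(a, b):
--     "same as multiply except b's nu and de are swapped"
--     "if there's common (unit, degree) pair, double the degree before merge"
--     common_nu = a[0].intersection(b[1])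
--     nu = set()
--     for u, deg in common_nu:
--         nu.add((u, deg * 2))
--     nu = nu.union(a[0].symmetric_difference(b[1]))
--
--     common_de = a[1].intersection(b[0])
--     de = set()
--     for u, deg in common_de:
--         de.add((u, deg * 2))
--     de = de.union(a[1].symmetric_difference(b[0]))
--     return simplify_unit((nu, de))
-- ===== SOURCE B (Python) =====
-- def unit_divide(a, b):
--     # Net degree per unit: a[0] and b[1] contribute positively, a[1] and b[0] negatively.
--     count = {}
--     for u, deg in a[0]:
--         count[u] = count.get(u, 0) + deg
--     for u, deg in b[1]:
--         count[u] = count.get(u, 0) + deg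
--     for u, deg in a[1]:
--         count[u] = count.get(u, 0) - deg
--     for u, deg in b[0]:
--         count[u] = count.get(u, 0) - deg
--     num = set()
--     den = set()
--     for u, deg in count.items():
--         if deg > 0:
--             num.add((u, deg))
--         if deg < 0:
--             den.add((u, -deg))
--     return (num, den)
-- ===== Notes on version B (the rewrite author's own statement) =====
-- stated objective: simpler
-- what changed: B nets each unit's degree in a single dict pass over the four input sets (a[0], b[1] add; a[1], b[0] subtract) instead of A's intersection/symmetric-difference/union set algebra with degree doubling.
-- intended difference: On inputs where, for some unit, the doubled common pairs of a[0]∩b[1] that collide with the symmetric difference carry a different degree total than those of a[1]∩b[0], A's set union deduplicates the doubled pair away and under-counts that unit (e.g. a=({('m',1)},set()), b=(set(),{('m',1),('m',2)}): A returns ({('m',2)},set())), while B returns the true net degree (({('m',4)},set())), which is the intended result of dividing the units. — e.g. on unit_divide(([("m", 1)], []), ([], [("m", 1), ("m", 2)])): A returns ([("m", 2)], []), B returns ([("m", 4)], [])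
import Mathlib
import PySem

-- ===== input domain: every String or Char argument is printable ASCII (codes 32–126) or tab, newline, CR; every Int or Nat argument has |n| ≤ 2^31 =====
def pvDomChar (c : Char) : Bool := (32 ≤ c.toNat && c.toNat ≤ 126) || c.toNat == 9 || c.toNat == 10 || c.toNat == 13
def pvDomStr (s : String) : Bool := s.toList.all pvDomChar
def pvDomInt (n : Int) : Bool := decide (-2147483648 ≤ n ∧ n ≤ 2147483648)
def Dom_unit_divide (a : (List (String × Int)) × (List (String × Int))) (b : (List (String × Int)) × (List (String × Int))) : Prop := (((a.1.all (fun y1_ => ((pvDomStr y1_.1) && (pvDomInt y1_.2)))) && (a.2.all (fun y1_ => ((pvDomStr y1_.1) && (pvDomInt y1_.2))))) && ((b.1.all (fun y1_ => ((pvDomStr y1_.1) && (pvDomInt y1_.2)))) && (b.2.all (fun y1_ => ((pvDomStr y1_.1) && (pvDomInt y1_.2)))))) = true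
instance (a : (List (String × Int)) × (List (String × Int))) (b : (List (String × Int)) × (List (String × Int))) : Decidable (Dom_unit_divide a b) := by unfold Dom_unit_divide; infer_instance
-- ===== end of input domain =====

-- B replaces A's set-algebra (intersection / symmetric difference / union with degree doubling)
-- by one pass that nets the degree of every unit in a single dict; simpler, same cost.
-- NOTE on set order: the Python versions receive and return Python SETS (hash iteration
-- order is not modelled by PySem).  Both ports read each input set as its deduplicated
-- list (PySem.Set.ofList) and return each result set canonically, as the sorted list of
-- its elements (pvCanon below, used identically by both ports); the returned value as a
-- SET is exactly what each Python returns.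

-- canonical list representation of a returned set (sorted lexicographically)
def pvCanon (s : List (String × Int)) : List (String × Int) :=
  PySem.List.sorted s (fun p => toLex p)

-- ===== PORT A =====
def simplify_unit (unit : (List (String × Int)) × (List (String × Int))) : (List (String × Int)) × (List (String × Int)) :=
  -- count = {}; for u, deg in unit[0]: count[u] = count.get(u, 0) + deg
  let count1 := unit.1.foldl (fun d p => d.insert p.1 (d.getD p.1 0 + p.2)) PySem.Dict.empty
  -- for u, deg in unit[1]: count[u] = count.get(u, 0) - deg
  let count := unit.2.foldl (fun d p => d.insert p.1 (d.getD p.1 0 - p.2)) count1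
  -- result = (set(), set()); for u, deg in count.items(): …
  let result := count.items.foldl (fun r p =>
      (if p.2 > 0 then PySem.Set.add r.1 (p.1, p.2) else r.1,
       if p.2 < 0 then PySem.Set.add r.2 (p.1, -p.2) else r.2))
      (PySem.Set.empty, PySem.Set.empty)
  (pvCanon result.1, pvCanon result.2)

def unit_divide (a : (List (String × Int)) × (List (String × Int))) (b : (List (String × Int)) × (List (String × Int))) : (List (String × Int)) × (List (String × Int)) :=
  -- the four arguments are Python sets: read as deduplicated lists
  let a0 := PySem.Set.ofList a.1
  let a1 := PySem.Set.ofList a.2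
  let b0 := PySem.Set.ofList b.1
  let b1 := PySem.Set.ofList b.2
  -- common_nu = a[0].intersection(b[1])
  let common_nu := PySem.Set.inter a0 b1
  -- nu = set(); for u, deg in common_nu: nu.add((u, deg * 2))
  let nu1 := common_nu.foldl (fun s p => PySem.Set.add s (p.1, p.2 * 2)) PySem.Set.empty
  -- nu = nu.union(a[0].symmetric_difference(b[1]))
  let nu := PySem.Set.union nu1 (PySem.Set.symmDiff a0 b1)
  -- common_de = a[1].intersection(b[0])
  let common_de := PySem.Set.inter a1 b0
  -- de = set(); for u, deg in common_de: de.add((u, deg * 2))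
  let de1 := common_de.foldl (fun s p => PySem.Set.add s (p.1, p.2 * 2)) PySem.Set.empty
  -- de = de.union(a[1].symmetric_difference(b[0]))
  let de := PySem.Set.union de1 (PySem.Set.symmDiff a1 b0)
  simplify_unit (nu, de)

-- ===== PORT B =====
def unit_divide_alt (a : (List (String × Int)) × (List (String × Int))) (b : (List (String × Int)) × (List (String × Int))) : (List (String × Int)) × (List (String × Int)) :=
  -- count = {}; four loops netting each unit's degree (a[0], b[1] add; a[1], b[0] subtract)
  let c0 := (PySem.Set.ofList a.1).foldl (fun d p => d.insert p.1 (d.getD p.1 0 + p.2)) PySem.Dict.empty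
  let c1 := (PySem.Set.ofList b.2).foldl (fun d p => d.insert p.1 (d.getD p.1 0 + p.2)) c0
  let c2 := (PySem.Set.ofList a.2).foldl (fun d p => d.insert p.1 (d.getD p.1 0 - p.2)) c1
  let c3 := (PySem.Set.ofList b.1).foldl (fun d p => d.insert p.1 (d.getD p.1 0 - p.2)) c2
  -- num = set(); den = set(); for u, deg in count.items(): …
  let nd := c3.items.foldl (fun r p =>
      (if p.2 > 0 then PySem.Set.add r.1 (p.1, p.2) else r.1,
       if p.2 < 0 then PySem.Set.add r.2 (p.1, -p.2) else r.2))
      (PySem.Set.empty, PySem.Set.empty)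
  (pvCanon nd.1, pvCanon nd.2)

-- ===== PRECONDITION & SPEC =====
-- degree total, for unit u, of the common pairs (u, d) of the two sets whose doubled pair
-- (u, 2d) lies in their symmetric difference — the degree A's set union deduplicates away
def pvLoss (x y : List (String × Int)) (u : String) : Int :=
  ((x.dedup.filter fun p => p.1 == u && decide (p ∈ y) &&
      (decide ((p.1, p.2 * 2) ∈ x) != decide ((p.1, p.2 * 2) ∈ y))).map fun p => p.2 * 2).sum

-- On inputs where, for some unit, the doubled common pairs of a[0]∩b[1] colliding with the
-- symmetric difference carry a different degree total than those of a[1]∩b[0], A's set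
-- union deduplicates them away and returns an under-counted degree for that unit, while B
-- returns the true net degree, which is the intended result of dividing the units.
def D_unit_divide (a : (List (String × Int)) × (List (String × Int))) (b : (List (String × Int)) × (List (String × Int))) : Prop :=
  ∃ u ∈ (a.1 ++ a.2 ++ b.1 ++ b.2).map Prod.fst, pvLoss a.1 b.2 u ≠ pvLoss a.2 b.1 u
instance (a : (List (String × Int)) × (List (String × Int))) (b : (List (String × Int)) × (List (String × Int))) : Decidable (D_unit_divide a b) := by unfold D_unit_divide; infer_instance

def Spec_unit_divide (a : (List (String × Int)) × (List (String × Int))) (b : (List (String × Int)) × (List (String × Int))) (out : (List (String × Int)) × (List (String × Int))) : Prop := ¬ D_unit_divide a b → out = unit_divide_alt a b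
instance (a : (List (String × Int)) × (List (String × Int))) (b : (List (String × Int)) × (List (String × Int))) (out : (List (String × Int)) × (List (String × Int))) : Decidable (Spec_unit_divide a b out) := by unfold Spec_unit_divide; infer_instance

def pvDiffWitness_unit_divide : ((List (String × Int)) × (List (String × Int))) × ((List (String × Int)) × (List (String × Int))) :=
  (([("m", 1)], []), ([], [("m", 1), ("m", 2)]))
def pvDiffWitnessOut_unit_divide : ((List (String × Int)) × (List (String × Int))) × ((List (String × Int)) × (List (String × Int))) :=
  (([("m", 2)], []), ([("m", 4)], []))

-- ===== CLAIM (what is proved, stated in full; the proofs are below) =====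
def Claim_unchanged_unit_divide : Prop := ∀ (a : (List (String × Int)) × (List (String × Int))) (b : (List (String × Int)) × (List (String × Int))), Dom_unit_divide a b → Spec_unit_divide a b (unit_divide a b)
def Claim_exact_unit_divide : Prop := ∀ (a : (List (String × Int)) × (List (String × Int))) (b : (List (String × Int)) × (List (String × Int))), Dom_unit_divide a b → D_unit_divide a b → unit_divide a b ≠ unit_divide_alt a b
def Claim_changed_unit_divide : Prop := Dom_unit_divide (pvDiffWitness_unit_divide.1) (pvDiffWitness_unit_divide.2) ∧ D_unit_divide (pvDiffWitness_unit_divide.1) (pvDiffWitness_unit_divide.2) ∧ unit_divide (pvDiffWitness_unit_divide.1) (pvDiffWitness_unit_divide.2) = pvDiffWitnessOut_unit_divide.1 ∧ unit_divide_alt (pvDiffWitness_unit_divide.1) (pvDiffWitness_unit_divide.2) = pvDiffWitnessOut_unit_divide.2 ∧ pvDiffWitnessOut_unit_divide.1 ≠ pvDiffWitnessOut_unit_divide.2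

-- ===== LEMMAS AND PROOFS =====

-- per-unit weighted degree sum of a pair list
def pvW (f : String × Int → Int) (l : List (String × Int)) (u : String) : Int :=
  ((l.filter (fun p => p.1 == u)).map f).sum

-- the symmetric difference of two pair sets, on their raw list representations
def pvSymmL (x y : List (String × Int)) : List (String × Int) :=
  (PySem.List.dedup x).filter (fun p => !decide (p ∈ y))
    ++ (PySem.List.dedup y).filter (fun p => !decide (p ∈ x))

-- pvLoss, written over the symmetric difference (the form A's port computes)
def pvLossW (x y : List (String × Int)) (u : String) : Int :=
  pvW Prod.snd
    ((pvSymmL x y).filter (fun q => decide (∃ p ∈ x, p ∈ y ∧ q = (p.1, p.2 * 2)))) u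

def pvDbl (p : String × Int) : String × Int := (p.1, p.2 * 2)

-- A's numerator (and denominator) set, as the port builds it
def pvNu (x y : List (String × Int)) : List (String × Int) :=
  PySem.Set.union
    ((PySem.Set.inter (PySem.Set.ofList x) (PySem.Set.ofList y)).foldl
      (fun s p => PySem.Set.add s (p.1, p.2 * 2)) PySem.Set.empty)
    (PySem.Set.symmDiff (PySem.Set.ofList x) (PySem.Set.ofList y))

lemma pvW_append (f : String × Int → Int) (l l' : List (String × Int)) (u : String) :
    pvW f (l ++ l') u = pvW f l u + pvW f l' u := by
  simp [pvW, List.filter_append]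

lemma pvW_perm (f : String × Int → Int) {l l' : List (String × Int)} (h : l.Perm l') (u : String) :
    pvW f l u = pvW f l' u := by
  exact List.Perm.sum_eq (List.Perm.map f (List.Perm.filter _ h))

lemma pvW_split (f : String × Int → Int) (c : String × Int → Bool) (s : List (String × Int)) (u : String) :
    pvW f (s.filter c) u + pvW f (s.filter (fun p => !c p)) u = pvW f s u := by
  induction s with
  | nil => simp [pvW]
  | cons p s ih =>
    by_cases hc : c p <;> by_cases hu : p.1 == u <;>
      simp [pvW, hc, hu, List.filter] at ih ⊢ <;> omega

lemma pvDictW (f : String × Int → Int) :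
    ∀ (l : List (String × Int)) (d : PySem.Dict String Int) (u : String),
    (l.foldl (fun d p => d.insert p.1 (d.getD p.1 0 + f p)) d).getD u 0
      = d.getD u 0 + pvW f l u := by
  intro l
  induction l with
  | nil => intro d u; simp [pvW]
  | cons p l ih =>
    intro d u
    simp only [List.foldl_cons, ih, PySem.Dict.getD_insert]
    by_cases hu : u = p.1
    · subst hu; simp [pvW]; try ring
    · have hne : (p.1 == u) = false := by simpa using Ne.symm hu
      simp [pvW, if_neg hu, hne]

lemma pvSubFold_eq (l : List (String × Int)) (d : PySem.Dict String Int) :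
    l.foldl (fun d p => d.insert p.1 (d.getD p.1 0 - p.2)) d
      = l.foldl (fun d p => d.insert p.1 (d.getD p.1 0 + (fun q : String × Int => -q.2) p)) d := by
  simp only [sub_eq_add_neg]

-- the result-building loop over the items of a dict with distinct keys appends
lemma pvAddFold (c : String × Int → Prop) [DecidablePred c] (h : String × Int → String × Int)
    (hfst : ∀ p, (h p).1 = p.1) :
    ∀ (l acc : List (String × Int)), (l.map Prod.fst).Nodup →
      (∀ p ∈ l, ∀ q ∈ acc, q.1 ≠ p.1) →
    l.foldl (fun s p => if c p then PySem.Set.add s (h p) else s) acc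
      = acc ++ (l.filter (fun p => decide (c p))).map h := by
  intro l
  induction l with
  | nil => intro acc _ _; simp
  | cons p l ih =>
    intro acc hnd hfr
    have hndt : (l.map Prod.fst).Nodup := by simpa using hnd.of_cons
    by_cases hc : c p
    · have hmem : h p ∉ acc := fun hm => hfr p (by simp) (h p) hm (hfst p)
      have hadd : PySem.Set.add acc (h p) = acc ++ [h p] :=
        PySem.Set.add_of_not_mem hmem
      simp only [List.foldl_cons, if_pos hc, hadd]
      rw [ih (acc ++ [h p]) hndt ?_]
      · simp [hc]
      · intro p' hp' q hq
        rcases List.mem_append.1 hq with hq | hq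
        · exact hfr p' (by simp [hp']) q hq
        · simp only [List.mem_singleton] at hq
          subst hq
          rw [hfst p]
          have hnd' : (p.1 :: l.map Prod.fst).Nodup := by simpa using hnd
          have hhead := (List.nodup_cons.mp hnd').1
          exact fun he => hhead (List.mem_map.2 ⟨p', hp', he.symm⟩)
    · simp only [List.foldl_cons, if_neg hc]
      rw [ih acc hndt (fun p' hp' q hq => hfr p' (by simp [hp']) q hq)]
      simp [hc]

-- decomposition of A's nu set when no doubled pair collides with the symmetric difference
lemma pvDbl_injective : Function.Injective pvDbl := by
  intro p q hpq
  simp only [pvDbl, Prod.mk.injEq] at hpq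
  exact Prod.ext hpq.1 (by omega)

lemma pvNu1_eq (x y : List (String × Int)) :
    (PySem.Set.inter (PySem.Set.ofList x) (PySem.Set.ofList y)).foldl
      (fun s p => PySem.Set.add s (p.1, p.2 * 2)) PySem.Set.empty
    = (PySem.Set.inter (PySem.Set.ofList x) (PySem.Set.ofList y)).map pvDbl := by
  have hnd : ((PySem.Set.inter (PySem.Set.ofList x) (PySem.Set.ofList y)).map pvDbl).Nodup :=
    ((PySem.Set.nodup_inter _ _ (PySem.Set.nodup_ofList x)).map pvDbl_injective)
  calc (PySem.Set.inter (PySem.Set.ofList x) (PySem.Set.ofList y)).foldl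
        (fun s p => PySem.Set.add s (p.1, p.2 * 2)) PySem.Set.empty
      = ((PySem.Set.inter (PySem.Set.ofList x) (PySem.Set.ofList y)).map pvDbl).foldl
          PySem.Set.add [] := by rw [List.foldl_map]; rfl
    _ = PySem.Set.ofList ((PySem.Set.inter (PySem.Set.ofList x) (PySem.Set.ofList y)).map pvDbl) :=
          (PySem.Set.ofList_eq_foldl _).symm
    _ = _ := PySem.Set.ofList_eq_self_of_nodup _ hnd

-- A's nu (resp. de) set decomposes into the doubled common pairs followed by the
-- symmetric-difference pairs that did not collide with a doubled pair
lemma pvNu_decomp (x y : List (String × Int)) :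
    pvNu x y
    = (PySem.Set.inter (PySem.Set.ofList x) (PySem.Set.ofList y)).map pvDbl
      ++ (PySem.Set.symmDiff (PySem.Set.ofList x) (PySem.Set.ofList y)).filter
          (fun q => !PySem.Set.contains ((PySem.Set.inter (PySem.Set.ofList x) (PySem.Set.ofList y)).map pvDbl) q) := by
  have hsymmnd : (PySem.Set.symmDiff (PySem.Set.ofList x) (PySem.Set.ofList y)).Nodup :=
    PySem.Set.nodup_symmDiff _ _ (PySem.Set.nodup_ofList x) (PySem.Set.nodup_ofList y)
  unfold pvNu
  rw [pvNu1_eq]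
  show PySem.Set.update _ _ = _
  rw [PySem.Set.update_eq_append_filter, PySem.Set.ofList_eq_self_of_nodup _ hsymmnd]

lemma pvContainsDecide (s : List (String × Int)) (q : String × Int) :
    PySem.Set.contains s q = decide (q ∈ s) := by
  by_cases h : q ∈ s
  · rw [(PySem.Set.contains_iff s q).2 h]
    simp [h]
  · have hc : ¬ PySem.Set.contains s q = true :=
      fun hc => h ((PySem.Set.contains_iff s q).1 hc)
    rw [Bool.not_eq_true] at hc
    rw [hc]
    simp [h]

lemma pvSymm_eq (x y : List (String × Int)) :
    PySem.Set.symmDiff (PySem.Set.ofList x) (PySem.Set.ofList y) = pvSymmL x y := by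
  show PySem.Set.diff _ _ ++ PySem.Set.diff _ _ = _
  unfold pvSymmL
  rw [← PySem.List.dedup_eq_ofList x, ← PySem.List.dedup_eq_ofList y]
  congr 1
  · exact List.filter_congr (fun p _ => by
      rw [pvContainsDecide, PySem.List.dedup_eq_ofList y]
      by_cases h : p ∈ y <;>
        simp [h, PySem.Set.mem_ofList])
  · exact List.filter_congr (fun p _ => by
      rw [pvContainsDecide, PySem.List.dedup_eq_ofList x]
      by_cases h : p ∈ x <;>
        simp [h, PySem.Set.mem_ofList])

lemma pvLossW_eq (x y : List (String × Int)) (u : String) :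
    pvW Prod.snd ((PySem.Set.symmDiff (PySem.Set.ofList x) (PySem.Set.ofList y)).filter
        (fun q => PySem.Set.contains ((PySem.Set.inter (PySem.Set.ofList x) (PySem.Set.ofList y)).map pvDbl) q)) u
    = pvLossW x y u := by
  unfold pvLossW
  rw [pvSymm_eq]
  have hf : (pvSymmL x y).filter
        (fun q => PySem.Set.contains ((PySem.Set.inter (PySem.Set.ofList x) (PySem.Set.ofList y)).map pvDbl) q)
      = (pvSymmL x y).filter (fun q => decide (∃ p ∈ x, p ∈ y ∧ q = (p.1, p.2 * 2))) := by
    refine List.filter_congr (fun q _ => ?_)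
    rw [pvContainsDecide]
    refine decide_eq_decide.2 ?_
    constructor
    · intro hm
      rcases List.mem_map.1 hm with ⟨p, hp, rfl⟩
      rcases (PySem.Set.mem_inter _ _ p).1 hp with ⟨hpx, hpy⟩
      exact ⟨p, (PySem.Set.mem_ofList x p).1 hpx, (PySem.Set.mem_ofList y p).1 hpy, rfl⟩
    · rintro ⟨p, hpx, hpy, rfl⟩
      exact List.mem_map.2 ⟨p, (PySem.Set.mem_inter _ _ p).2
        ⟨(PySem.Set.mem_ofList x p).2 hpx, (PySem.Set.mem_ofList y p).2 hpy⟩, rfl⟩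
  rw [hf]

lemma pvMemSymmL (x y : List (String × Int)) (q : String × Int) :
    q ∈ pvSymmL x y ↔ (q ∈ x ∧ q ∉ y) ∨ (q ∈ y ∧ q ∉ x) := by
  rw [← pvSymm_eq]
  rw [PySem.Set.mem_symmDiff]
  simp [PySem.Set.mem_ofList]

-- the compact pvLoss (used by D_) computes exactly pvLossW
lemma pvLoss_eq_lossW (x y : List (String × Int)) (u : String) :
    pvLoss x y u = pvLossW x y u := by
  have hnds : (pvSymmL x y).Nodup := by
    rw [← pvSymm_eq]
    exact PySem.Set.nodup_symmDiff _ _ (PySem.Set.nodup_ofList x) (PySem.Set.nodup_ofList y)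
  have hperm : ((((pvSymmL x y).filter
        (fun q => decide (∃ p ∈ x, p ∈ y ∧ q = (p.1, p.2 * 2)))).filter (fun q => q.1 == u)).Perm
      ((x.dedup.filter fun p => p.1 == u && decide (p ∈ y) &&
        (decide ((p.1, p.2 * 2) ∈ x) != decide ((p.1, p.2 * 2) ∈ y))).map pvDbl)) := by
    refine (List.perm_ext_iff_of_nodup ((hnds.filter _).filter _)
      (((List.nodup_dedup x).filter _).map pvDbl_injective)).2 (fun q => ?_)
    rw [List.mem_filter, List.mem_filter, pvMemSymmL]
    constructor
    · rintro ⟨⟨hS, hex⟩, hqu⟩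
      rcases of_decide_eq_true hex with ⟨p, hpx, hpy, rfl⟩
      refine List.mem_map.2 ⟨p, List.mem_filter.2 ⟨List.mem_dedup.2 hpx, ?_⟩, rfl⟩
      have hqu' : p.1 = u := by simpa using hqu
      simp only [Bool.and_eq_true, beq_iff_eq, decide_eq_true_eq, bne_iff_ne, ne_eq,
        decide_eq_decide]
      refine ⟨⟨hqu', hpy⟩, ?_⟩
      rcases hS with ⟨h1, h2⟩ | ⟨h1, h2⟩
      · exact fun hiff => h2 (hiff.1 h1)
      · exact fun hiff => h2 (hiff.2 h1)
    · intro hm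
      rcases List.mem_map.1 hm with ⟨p, hp, rfl⟩
      rcases List.mem_filter.1 hp with ⟨hpd, hc⟩
      have hpx : p ∈ x := List.mem_dedup.1 hpd
      simp only [Bool.and_eq_true, beq_iff_eq, decide_eq_true_eq, bne_iff_ne, ne_eq,
        decide_eq_decide] at hc
      obtain ⟨⟨hpu, hpy⟩, hxor⟩ := hc
      refine ⟨⟨?_, decide_eq_true ⟨p, hpx, hpy, rfl⟩⟩, by simpa [pvDbl] using hpu⟩
      by_cases hqx : (p.1, p.2 * 2) ∈ x
      · exact Or.inl ⟨hqx, fun hqy => hxor (iff_of_true hqx hqy)⟩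
      · by_cases hqy : (p.1, p.2 * 2) ∈ y
        · exact Or.inr ⟨hqy, hqx⟩
        · exact absurd (iff_of_false hqx hqy) (fun h => hxor h)
  unfold pvLoss pvLossW pvW
  rw [List.Perm.sum_eq (List.Perm.map Prod.snd hperm), List.map_map]
  rfl

lemma pvW_dbl (l : List (String × Int)) (u : String) :
    pvW Prod.snd (l.map pvDbl) u = 2 * pvW Prod.snd l u := by
  induction l with
  | nil => simp [pvW]
  | cons p l ih =>
    by_cases hu : p.1 == u <;>
      simp [pvW, pvDbl, List.filter, hu] at ih ⊢ <;> omega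

-- the doubled common pairs plus the full symmetric difference weigh exactly x + y
lemma pvMS (x y : List (String × Int)) (u : String) :
    pvW Prod.snd ((PySem.Set.inter (PySem.Set.ofList x) (PySem.Set.ofList y)).map pvDbl) u
      + pvW Prod.snd (PySem.Set.symmDiff (PySem.Set.ofList x) (PySem.Set.ofList y)) u
    = pvW Prod.snd (PySem.Set.ofList x) u + pvW Prod.snd (PySem.Set.ofList y) u := by
  set x' := PySem.Set.ofList x
  set y' := PySem.Set.ofList y
  have hsplit1 : pvW Prod.snd (PySem.Set.inter x' y') u + pvW Prod.snd (PySem.Set.diff x' y') u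
      = pvW Prod.snd x' u := pvW_split Prod.snd (fun p => y'.contains p) x' u
  have hsplit2 : pvW Prod.snd (PySem.Set.inter y' x') u + pvW Prod.snd (PySem.Set.diff y' x') u
      = pvW Prod.snd y' u := pvW_split Prod.snd (fun p => x'.contains p) y' u
  have hswap : pvW Prod.snd (PySem.Set.inter y' x') u = pvW Prod.snd (PySem.Set.inter x' y') u := by
    refine pvW_perm Prod.snd ?_ u
    refine (List.perm_ext_iff_of_nodup (PySem.Set.nodup_inter _ _ (PySem.Set.nodup_ofList y))
      (PySem.Set.nodup_inter _ _ (PySem.Set.nodup_ofList x))).2 (fun q => ?_)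
    rw [PySem.Set.mem_inter, PySem.Set.mem_inter]
    exact and_comm
  rw [pvW_dbl]
  show 2 * pvW Prod.snd (PySem.Set.inter x' y') u
      + pvW Prod.snd (PySem.Set.diff x' y' ++ PySem.Set.diff y' x') u = _
  rw [pvW_append]
  omega

lemma pvNuW (x y : List (String × Int)) (u : String) :
    pvW Prod.snd (pvNu x y) u
      = pvW Prod.snd (PySem.Set.ofList x) u + pvW Prod.snd (PySem.Set.ofList y) u
        - pvLoss x y u := by
  rw [pvNu_decomp, pvW_append]
  have hsym := pvW_split Prod.snd
    (fun q => PySem.Set.contains ((PySem.Set.inter (PySem.Set.ofList x) (PySem.Set.ofList y)).map pvDbl) q)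
    (PySem.Set.symmDiff (PySem.Set.ofList x) (PySem.Set.ofList y)) u
  have hloss := (pvLossW_eq x y u).trans (pvLoss_eq_lossW x y u).symm
  have hms := pvMS x y u
  omega

lemma pvNuKeys (x y : List (String × Int)) (u : String) :
    u ∈ (pvNu x y).map Prod.fst ↔ (∃ p ∈ x, p.1 = u) ∨ (∃ p ∈ y, p.1 = u) := by
  rw [pvNu_decomp]
  constructor
  · intro hm
    rcases List.mem_map.1 hm with ⟨q, hq, hqu⟩
    rcases List.mem_append.1 hq with hq | hq
    · rcases List.mem_map.1 hq with ⟨p, hp, rfl⟩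
      rcases (PySem.Set.mem_inter _ _ p).1 hp with ⟨hpx, _⟩
      exact Or.inl ⟨p, (PySem.Set.mem_ofList x p).1 hpx, hqu⟩
    · rcases (PySem.Set.mem_symmDiff _ _ q).1 (List.mem_filter.1 hq).1 with ⟨h1, _⟩ | ⟨h1, _⟩
      · exact Or.inl ⟨q, (PySem.Set.mem_ofList x q).1 h1, hqu⟩
      · exact Or.inr ⟨q, (PySem.Set.mem_ofList y q).1 h1, hqu⟩
  · have hside : ∀ q : String × Int,
        q ∈ PySem.Set.symmDiff (PySem.Set.ofList x) (PySem.Set.ofList y) → q.1 = u →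
        u ∈ ((PySem.Set.inter (PySem.Set.ofList x) (PySem.Set.ofList y)).map pvDbl
          ++ (PySem.Set.symmDiff (PySem.Set.ofList x) (PySem.Set.ofList y)).filter
            (fun q => !PySem.Set.contains ((PySem.Set.inter (PySem.Set.ofList x) (PySem.Set.ofList y)).map pvDbl) q)).map Prod.fst := by
      intro q hqS hqu
      by_cases hM : q ∈ (PySem.Set.inter (PySem.Set.ofList x) (PySem.Set.ofList y)).map pvDbl
      · exact List.mem_map.2 ⟨q, List.mem_append.2 (Or.inl hM), hqu⟩
      · refine List.mem_map.2 ⟨q, List.mem_append.2 (Or.inr (List.mem_filter.2 ⟨hqS, ?_⟩)), hqu⟩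
        rw [pvContainsDecide]
        simp [hM]
    rintro (⟨p, hp, hu⟩ | ⟨p, hp, hu⟩)
    · by_cases hy : p ∈ y
      · exact List.mem_map.2 ⟨pvDbl p, List.mem_append.2 (Or.inl (List.mem_map.2
          ⟨p, (PySem.Set.mem_inter _ _ p).2
            ⟨(PySem.Set.mem_ofList x p).2 hp, (PySem.Set.mem_ofList y p).2 hy⟩, rfl⟩)), hu⟩
      · exact hside p ((PySem.Set.mem_symmDiff _ _ p).2
          (Or.inl ⟨(PySem.Set.mem_ofList x p).2 hp,
            fun hc => hy ((PySem.Set.mem_ofList y p).1 hc)⟩)) hu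
    · by_cases hx : p ∈ x
      · exact List.mem_map.2 ⟨pvDbl p, List.mem_append.2 (Or.inl (List.mem_map.2
          ⟨p, (PySem.Set.mem_inter _ _ p).2
            ⟨(PySem.Set.mem_ofList x p).2 hx, (PySem.Set.mem_ofList y p).2 hp⟩, rfl⟩)), hu⟩
      · exact hside p ((PySem.Set.mem_symmDiff _ _ p).2
          (Or.inr ⟨(PySem.Set.mem_ofList y p).2 hp,
            fun hc => hx ((PySem.Set.mem_ofList x p).1 hc)⟩)) hu

lemma pvLoss_zero (x y : List (String × Int)) (u : String)
    (hx : ∀ p ∈ x, p.1 ≠ u) : pvLoss x y u = 0 := by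
  unfold pvLoss
  rw [List.filter_eq_nil_iff.2 (fun p hp => by
    simp [hx p (List.mem_dedup.1 hp)])]
  rfl

lemma pvW_neg (l : List (String × Int)) (u : String) :
    pvW (fun q : String × Int => -q.2) l u = - pvW Prod.snd l u := by
  induction l with
  | nil => simp [pvW]
  | cons p l ih =>
    by_cases hu : p.1 == u <;> simp [pvW, List.filter, hu] at ih ⊢ <;> omega

lemma pvCanon_perm {l l' : List (String × Int)} (h : l.Perm l') : pvCanon l = pvCanon l' :=
  PySem.List.sorted_eq_sorted_of_perm l l' (fun p => toLex p) (fun _ _ hpq => hpq) h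

-- the emit loop of both ports, over the items of a dict with distinct keys
lemma pvEmit (d : PySem.Dict String Int) (hnd : d.keys.Nodup) :
    d.items.foldl (fun r p =>
        (if p.2 > 0 then PySem.Set.add r.1 (p.1, p.2) else r.1,
         if p.2 < 0 then PySem.Set.add r.2 (p.1, -p.2) else r.2))
      (PySem.Set.empty, PySem.Set.empty)
    = ((d.keys.filter (fun u => decide (0 < d.getD u 0))).map (fun u => (u, d.getD u 0)),
       (d.keys.filter (fun u => decide (d.getD u 0 < 0))).map (fun u => (u, -(d.getD u 0)))) := by
  have hndi : (d.items.map Prod.fst).Nodup := hnd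
  have hfr : ∀ p ∈ d.items, ∀ q ∈ (PySem.Set.empty : PySem.Set (String × Int)), q.1 ≠ p.1 := by
    intro p _ q hq; simp [PySem.Set.empty] at hq
  have hsplit : ∀ (l : List (String × Int)) (r1 r2 : PySem.Set (String × Int)),
      l.foldl (fun r p =>
          (if p.2 > 0 then PySem.Set.add r.1 (p.1, p.2) else r.1,
           if p.2 < 0 then PySem.Set.add r.2 (p.1, -p.2) else r.2)) (r1, r2)
      = (l.foldl (fun s p => if p.2 > 0 then PySem.Set.add s (p.1, p.2) else s) r1,
         l.foldl (fun s p => if p.2 < 0 then PySem.Set.add s (p.1, -p.2) else s) r2) := by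
    intro l
    induction l with
    | nil => intro r1 r2; rfl
    | cons p l ih => intro r1 r2; simp only [List.foldl_cons]; exact ih _ _
  rw [hsplit]
  rw [pvAddFold (fun p => p.2 > 0) (fun p => (p.1, p.2)) (fun _ => rfl) d.items PySem.Set.empty hndi hfr]
  rw [pvAddFold (fun p => p.2 < 0) (fun p => (p.1, -p.2)) (fun _ => rfl) d.items PySem.Set.empty hndi hfr]
  rw [PySem.Dict.items_eq_map_keys d hnd 0]
  simp only [List.filter_map, List.map_map]
  rfl

-- the two count dicts, as the ports build them
def pvDictA (a b : (List (String × Int)) × (List (String × Int))) : PySem.Dict String Int :=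
  (pvNu a.2 b.1).foldl (fun d p => d.insert p.1 (d.getD p.1 0 - p.2))
    ((pvNu a.1 b.2).foldl (fun d p => d.insert p.1 (d.getD p.1 0 + p.2)) PySem.Dict.empty)

def pvDictB (a b : (List (String × Int)) × (List (String × Int))) : PySem.Dict String Int :=
  (PySem.Set.ofList b.1).foldl (fun d p => d.insert p.1 (d.getD p.1 0 - p.2))
    ((PySem.Set.ofList a.2).foldl (fun d p => d.insert p.1 (d.getD p.1 0 - p.2))
      ((PySem.Set.ofList b.2).foldl (fun d p => d.insert p.1 (d.getD p.1 0 + p.2))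
        ((PySem.Set.ofList a.1).foldl (fun d p => d.insert p.1 (d.getD p.1 0 + p.2)) PySem.Dict.empty)))

lemma pvDictANodup (a b : (List (String × Int)) × (List (String × Int))) : (pvDictA a b).keys.Nodup :=
  PySem.Dict.nodup_keys_foldl_insert_key _ _ _ _
    (PySem.Dict.nodup_keys_foldl_insert_key _ _ _ _ PySem.Dict.nodup_keys_empty)

lemma pvDictBNodup (a b : (List (String × Int)) × (List (String × Int))) : (pvDictB a b).keys.Nodup :=
  PySem.Dict.nodup_keys_foldl_insert_key _ _ _ _
    (PySem.Dict.nodup_keys_foldl_insert_key _ _ _ _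
      (PySem.Dict.nodup_keys_foldl_insert_key _ _ _ _
        (PySem.Dict.nodup_keys_foldl_insert_key _ _ _ _ PySem.Dict.nodup_keys_empty)))

lemma pvAChar (a b : (List (String × Int)) × (List (String × Int))) :
    unit_divide a b
    = (pvCanon (((pvDictA a b).keys.filter (fun u => decide (0 < (pvDictA a b).getD u 0))).map
          (fun u => (u, (pvDictA a b).getD u 0))),
       pvCanon (((pvDictA a b).keys.filter (fun u => decide ((pvDictA a b).getD u 0 < 0))).map
          (fun u => (u, -((pvDictA a b).getD u 0))))) := by
  have h0 : unit_divide a b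
      = (pvCanon (((pvDictA a b).items.foldl (fun r p =>
            (if p.2 > 0 then PySem.Set.add r.1 (p.1, p.2) else r.1,
             if p.2 < 0 then PySem.Set.add r.2 (p.1, -p.2) else r.2))
          (PySem.Set.empty, PySem.Set.empty)).1),
         pvCanon (((pvDictA a b).items.foldl (fun r p =>
            (if p.2 > 0 then PySem.Set.add r.1 (p.1, p.2) else r.1,
             if p.2 < 0 then PySem.Set.add r.2 (p.1, -p.2) else r.2))
          (PySem.Set.empty, PySem.Set.empty)).2)) := rfl
  rw [h0, pvEmit _ (pvDictANodup a b)]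

lemma pvBChar (a b : (List (String × Int)) × (List (String × Int))) :
    unit_divide_alt a b
    = (pvCanon (((pvDictB a b).keys.filter (fun u => decide (0 < (pvDictB a b).getD u 0))).map
          (fun u => (u, (pvDictB a b).getD u 0))),
       pvCanon (((pvDictB a b).keys.filter (fun u => decide ((pvDictB a b).getD u 0 < 0))).map
          (fun u => (u, -((pvDictB a b).getD u 0))))) := by
  have h0 : unit_divide_alt a b
      = (pvCanon (((pvDictB a b).items.foldl (fun r p =>
            (if p.2 > 0 then PySem.Set.add r.1 (p.1, p.2) else r.1,
             if p.2 < 0 then PySem.Set.add r.2 (p.1, -p.2) else r.2))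
          (PySem.Set.empty, PySem.Set.empty)).1),
         pvCanon (((pvDictB a b).items.foldl (fun r p =>
            (if p.2 > 0 then PySem.Set.add r.1 (p.1, p.2) else r.1,
             if p.2 < 0 then PySem.Set.add r.2 (p.1, -p.2) else r.2))
          (PySem.Set.empty, PySem.Set.empty)).2)) := rfl
  rw [h0, pvEmit _ (pvDictBNodup a b)]

lemma pvDictAGetD (a b : (List (String × Int)) × (List (String × Int))) (u : String) :
    (pvDictA a b).getD u 0
      = pvW Prod.snd (pvNu a.1 b.2) u - pvW Prod.snd (pvNu a.2 b.1) u := by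
  unfold pvDictA
  rw [pvSubFold_eq, pvDictW, pvDictW, PySem.Dict.getD_empty, pvW_neg]
  ring

lemma pvDictBGetD (a b : (List (String × Int)) × (List (String × Int))) (u : String) :
    (pvDictB a b).getD u 0
      = pvW Prod.snd (PySem.Set.ofList a.1) u + pvW Prod.snd (PySem.Set.ofList b.2) u
        - pvW Prod.snd (PySem.Set.ofList a.2) u - pvW Prod.snd (PySem.Set.ofList b.1) u := by
  unfold pvDictB
  rw [pvSubFold_eq, pvDictW, pvSubFold_eq, pvDictW, pvDictW, pvDictW,
    PySem.Dict.getD_empty, pvW_neg, pvW_neg]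
  ring

lemma pvMemOf (x : List (String × Int)) (u : String) :
    u ∈ (PySem.Set.ofList x).map Prod.fst ↔ ∃ p ∈ x, p.1 = u := by
  simp [List.mem_map, PySem.Set.mem_ofList]

lemma pvDictAKeysMem (a b : (List (String × Int)) × (List (String × Int))) (u : String) :
    u ∈ (pvDictA a b).keys ↔
      ((∃ p ∈ a.1, p.1 = u) ∨ (∃ p ∈ b.2, p.1 = u)) ∨ ((∃ p ∈ a.2, p.1 = u) ∨ (∃ p ∈ b.1, p.1 = u)) := by
  unfold pvDictA
  rw [PySem.Dict.keys_foldl_insert_key, PySem.Dict.keys_foldl_insert_key, PySem.Dict.keys_empty]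
  rw [PySem.Set.mem_update, PySem.Set.mem_update]
  rw [pvNuKeys a.1 b.2 u, pvNuKeys a.2 b.1 u]
  simp

lemma pvDictBKeysMem (a b : (List (String × Int)) × (List (String × Int))) (u : String) :
    u ∈ (pvDictB a b).keys ↔
      ((∃ p ∈ a.1, p.1 = u) ∨ (∃ p ∈ b.2, p.1 = u)) ∨ ((∃ p ∈ a.2, p.1 = u) ∨ (∃ p ∈ b.1, p.1 = u)) := by
  unfold pvDictB
  rw [PySem.Dict.keys_foldl_insert_key, PySem.Dict.keys_foldl_insert_key,
    PySem.Dict.keys_foldl_insert_key, PySem.Dict.keys_foldl_insert_key, PySem.Dict.keys_empty]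
  rw [PySem.Set.mem_update, PySem.Set.mem_update, PySem.Set.mem_update, PySem.Set.mem_update]
  rw [pvMemOf, pvMemOf, pvMemOf, pvMemOf]
  simp
  tauto

lemma pvFinal (kA kB : List String) (cA cB : String → Int)
    (hk : kA.Perm kB) (hc : ∀ u, cA u = cB u) :
    (pvCanon ((kA.filter (fun u => decide (0 < cA u))).map (fun u => (u, cA u))),
     pvCanon ((kA.filter (fun u => decide (cA u < 0))).map (fun u => (u, -(cA u)))))
    = (pvCanon ((kB.filter (fun u => decide (0 < cB u))).map (fun u => (u, cB u))),
       pvCanon ((kB.filter (fun u => decide (cB u < 0))).map (fun u => (u, -(cB u))))) := by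
  have hcf : cA = cB := funext hc
  subst hcf
  exact Prod.ext
    (pvCanon_perm (List.Perm.map _ (List.Perm.filter _ hk)))
    (pvCanon_perm (List.Perm.map _ (List.Perm.filter _ hk)))

lemma pvLossBalanced (a b : (List (String × Int)) × (List (String × Int)))
    (hD : ¬ D_unit_divide a b) (u : String) :
    pvLoss a.1 b.2 u = pvLoss a.2 b.1 u := by
  by_cases hu : u ∈ (a.1 ++ a.2 ++ b.1 ++ b.2).map Prod.fst
  · by_contra hne
    exact hD ⟨u, hu, hne⟩
  · have hmem : ∀ (l : List (String × Int)), (∀ q, q ∈ l → q ∈ a.1 ++ a.2 ++ b.1 ++ b.2) →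
        ∀ p ∈ l, p.1 ≠ u := by
      intro l hl p hp he
      exact hu (List.mem_map.2 ⟨p, hl p hp, he⟩)
    rw [pvLoss_zero a.1 b.2 u (hmem a.1 (fun q hq => by simp [hq])),
        pvLoss_zero a.2 b.1 u (hmem a.2 (fun q hq => by simp [hq]))]

lemma pvCount_eq (a b : (List (String × Int)) × (List (String × Int)))
    (hD : ¬ D_unit_divide a b) (u : String) :
    (pvDictA a b).getD u 0 = (pvDictB a b).getD u 0 := by
  rw [pvDictAGetD, pvDictBGetD, pvNuW a.1 b.2 u, pvNuW a.2 b.1 u, pvLossBalanced a b hD u]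
  ring

lemma pvKeysPerm (a b : (List (String × Int)) × (List (String × Int))) :
    (pvDictA a b).keys.Perm (pvDictB a b).keys := by
  refine (List.perm_ext_iff_of_nodup (pvDictANodup a b) (pvDictBNodup a b)).2 (fun u => ?_)
  rw [pvDictAKeysMem a b u, pvDictBKeysMem a b u]

-- membership characterisations of the two emitted components
lemma pvSelMemNum (d : PySem.Dict String Int) (q : String × Int) :
    q ∈ (d.keys.filter (fun u => decide (0 < d.getD u 0))).map (fun u => (u, d.getD u 0))
      ↔ q.1 ∈ d.keys ∧ q.2 = d.getD q.1 0 ∧ 0 < d.getD q.1 0 := by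
  constructor
  · intro hm
    rcases List.mem_map.1 hm with ⟨k, hk, rfl⟩
    rcases List.mem_filter.1 hk with ⟨hk1, hk2⟩
    exact ⟨hk1, rfl, of_decide_eq_true hk2⟩
  · rintro ⟨h1, h2, h3⟩
    exact List.mem_map.2 ⟨q.1, List.mem_filter.2 ⟨h1, decide_eq_true h3⟩, Prod.ext rfl h2.symm⟩

lemma pvSelMemDen (d : PySem.Dict String Int) (q : String × Int) :
    q ∈ (d.keys.filter (fun u => decide (d.getD u 0 < 0))).map (fun u => (u, -(d.getD u 0)))
      ↔ q.1 ∈ d.keys ∧ q.2 = -(d.getD q.1 0) ∧ d.getD q.1 0 < 0 := by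
  constructor
  · intro hm
    rcases List.mem_map.1 hm with ⟨k, hk, rfl⟩
    rcases List.mem_filter.1 hk with ⟨hk1, hk2⟩
    exact ⟨hk1, rfl, of_decide_eq_true hk2⟩
  · rintro ⟨h1, h2, h3⟩
    exact List.mem_map.2 ⟨q.1, List.mem_filter.2 ⟨h1, decide_eq_true h3⟩, Prod.ext rfl h2.symm⟩

lemma pvGetD_ne_zero_mem (d : PySem.Dict String Int) (u : String)
    (h : d.getD u 0 ≠ 0) : u ∈ d.keys := by
  by_contra hmem
  have hc : ¬ d.contains u = true := fun hc => hmem ((PySem.Dict.contains_iff_mem_keys d u).1 hc)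
  rw [Bool.not_eq_true] at hc
  exact h (PySem.Dict.getD_of_not_contains d 0 hc)

lemma pvMemCanon {l l' : List (String × Int)} (h : pvCanon l = pvCanon l') (q : String × Int) :
    q ∈ l ↔ q ∈ l' := by
  have hp : (pvCanon l).Perm l := PySem.List.sorted_perm l (fun p => toLex p) false
  have hp' : (pvCanon l').Perm l' := PySem.List.sorted_perm l' (fun p => toLex p) false
  exact Iff.trans (hp.mem_iff (a := q)).symm (Iff.trans (by rw [h]) (hp'.mem_iff (a := q)))

-- ===== VERDICT (by name: the statement is the Claim_ definition above) =====
theorem unit_divide_spec : Claim_unchanged_unit_divide := by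
  intro a b _hdom hD
  rw [pvAChar, pvBChar]
  exact pvFinal _ _ _ _ (pvKeysPerm a b) (pvCount_eq a b hD)

theorem unit_divide_changed : Claim_changed_unit_divide := by
  unfold Claim_changed_unit_divide; decide

theorem unit_divide_tight : Claim_exact_unit_divide := by
  intro a b _hdom hD hEq
  obtain ⟨u, _hu, hneL⟩ := hD
  have hAB : (pvDictA a b).getD u 0 ≠ (pvDictB a b).getD u 0 := by
    rw [pvDictAGetD, pvDictBGetD, pvNuW a.1 b.2 u, pvNuW a.2 b.1 u]
    omega
  rw [pvAChar, pvBChar, Prod.mk.injEq] at hEq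
  have hnum := pvMemCanon hEq.1
  have hden := pvMemCanon hEq.2
  rcases lt_trichotomy ((pvDictA a b).getD u 0) 0 with hA | hA | hA
  · have hmem : (u, -((pvDictA a b).getD u 0)) ∈ _ :=
      (pvSelMemDen (pvDictA a b) (u, -((pvDictA a b).getD u 0))).2
        ⟨pvGetD_ne_zero_mem _ u (by omega), rfl, hA⟩
    have := ((pvSelMemDen (pvDictB a b) _).1 ((hden _).1 hmem)).2.1
    simp at this
    omega
  · rcases lt_trichotomy ((pvDictB a b).getD u 0) 0 with hB | hB | hB
    · have hmem : (u, -((pvDictB a b).getD u 0)) ∈ _ :=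
        (pvSelMemDen (pvDictB a b) (u, -((pvDictB a b).getD u 0))).2
          ⟨pvGetD_ne_zero_mem _ u (by omega), rfl, hB⟩
      have := ((pvSelMemDen (pvDictA a b) _).1 ((hden _).2 hmem)).2.2
      simp at this
      omega
    · exact hAB (by omega)
    · have hmem : (u, (pvDictB a b).getD u 0) ∈ _ :=
        (pvSelMemNum (pvDictB a b) (u, (pvDictB a b).getD u 0)).2
          ⟨pvGetD_ne_zero_mem _ u (by omega), rfl, hB⟩
      have := ((pvSelMemNum (pvDictA a b) _).1 ((hnum _).2 hmem)).2.2
      simp at this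
      omega
  · have hmem : (u, (pvDictA a b).getD u 0) ∈ _ :=
      (pvSelMemNum (pvDictA a b) (u, (pvDictA a b).getD u 0)).2
        ⟨pvGetD_ne_zero_mem _ u (by omega), rfl, hA⟩
    have := ((pvSelMemNum (pvDictB a b) _).1 ((hnum _).1 hmem)).2.1
    simp at this
    omega
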